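-- pv_equiv track=rewrite | github.com/colintzw/AISTest2 | helper/HelperFunctions.py | segmentSingleAxis
-- ===== SOURCE A (Python) =====
-- def segmentSingleAxis(projection):
-- 	regions = []
-- 	regionMinSize = 2
-- 	regionSize = 1
-- 	curr_start = 0
-- 	for nn in range(1, len(projection)):
-- 		if projection[nn] == 1:
-- 			if regionSize >= regionMinSize:
-- 				regions.append((curr_start, nn - 1))
-- 			regionSize = 0
-- 		elif (regionSize == 0):
-- 			regionSize = 1
-- 			curr_start = nn
-- 		else:
-- 			regionSize += 1
--
-- 	if regionSize >= regionMinSize: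
-- 		regions.append((curr_start, len(projection) - 1))
--
-- 	return regions
-- ===== SOURCE B (Python) =====
-- def segmentSingleAxis(projection):
--     n = len(projection)
--     walls = [nn for nn in range(1, n) if projection[nn] == 1]
--     regions = []
--     start = 0
--     for w in walls:
--         if w - start >= 2:
--             regions.append((start, w - 1))
--         start = w + 1
--     if n - start >= 2:
--         regions.append((start, n - 1))
--     return regions
-- ===== Notes on version B (the rewrite author's own statement) =====
-- stated objective: alternative
-- what changed: B first materializes the list of wall indices (positions nn>=1 with value 1), then emits regions in a separate scan with a running start=previous wall+1, instead of A's single loop tracking a region-size counter and current start.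
import Mathlib
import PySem

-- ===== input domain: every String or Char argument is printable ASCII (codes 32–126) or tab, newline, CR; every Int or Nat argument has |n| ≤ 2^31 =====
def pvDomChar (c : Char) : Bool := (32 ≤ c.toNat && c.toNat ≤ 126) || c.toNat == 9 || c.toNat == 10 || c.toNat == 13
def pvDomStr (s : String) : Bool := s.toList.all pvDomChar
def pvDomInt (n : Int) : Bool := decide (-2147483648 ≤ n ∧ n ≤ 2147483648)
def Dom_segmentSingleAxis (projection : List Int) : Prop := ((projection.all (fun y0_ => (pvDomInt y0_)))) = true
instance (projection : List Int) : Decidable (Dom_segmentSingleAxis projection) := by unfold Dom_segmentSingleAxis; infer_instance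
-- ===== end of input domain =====

-- B builds the list of wall indices first and then emits the regions in a separate
-- scan with a running start, instead of A's single loop with a region-size counter
-- (alternative decomposition, same cost; return values proved equal on all inputs).

-- ===== PORT A =====
-- loop body of A's for-loop, state = (regions, regionSize, curr_start)
def stepA (proj : List Int) : (List (Int × Int) × Int × Int) → Int → (List (Int × Int) × Int × Int)
  | (regions, regionSize, currStart), nn =>
    if PySem.List.pyGetD proj nn 0 = 1 then
      ((if regionSize ≥ 2 then regions ++ [(currStart, nn - 1)] else regions), 0, currStart)
    else if regionSize = 0 then (regions, 1, nn)
    else (regions, regionSize + 1, currStart)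

def segmentSingleAxis (projection : List Int) : List (Int × Int) :=
  let st := (PySem.List.pyRange 1 (projection.length : Int) 1).foldl (stepA projection) ([], 1, 0)
  if st.2.1 ≥ 2 then st.1 ++ [(st.2.2, (projection.length : Int) - 1)] else st.1

-- ===== PORT B =====
-- predicate of B's wall comprehension: projection[nn] == 1
def wallP (proj : List Int) (nn : Int) : Bool := decide (PySem.List.pyGetD proj nn 0 = 1)

-- loop body of B's emission scan, state = (regions, start)
def stepB : (List (Int × Int) × Int) → Int → (List (Int × Int) × Int)
  | (regions, start), w =>
    ((if w - start ≥ 2 then regions ++ [(start, w - 1)] else regions), w + 1)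

def segmentSingleAxis_alt (projection : List Int) : List (Int × Int) :=
  let n : Int := projection.length
  let walls := (PySem.List.pyRange 1 n 1).filter (wallP projection)
  let st := walls.foldl stepB ([], 0)
  if n - st.2 ≥ 2 then st.1 ++ [(st.2, n - 1)] else st.1

-- ===== PRECONDITION & SPEC =====
def Spec_segmentSingleAxis (projection : List Int) (out : List (Int × Int)) : Prop := out = segmentSingleAxis_alt projection
instance (projection : List Int) (out : List (Int × Int)) : Decidable (Spec_segmentSingleAxis projection out) := by unfold Spec_segmentSingleAxis; infer_instance

-- ===== CLAIM (what is proved, stated in full; the proofs are below) =====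
def Claim_equal_segmentSingleAxis : Prop := ∀ (projection : List Int), Dom_segmentSingleAxis projection → Spec_segmentSingleAxis projection (segmentSingleAxis projection)

-- ===== LEMMAS AND PROOFS =====

-- A's final append, applied to the loop state
def finA (n : Int) (st : List (Int × Int) × Int × Int) : List (Int × Int) :=
  if st.2.1 ≥ 2 then st.1 ++ [(st.2.2, n - 1)] else st.1

-- B's final append, applied to the loop state
def finB (n : Int) (st : List (Int × Int) × Int) : List (Int × Int) :=
  if n - st.2 ≥ 2 then st.1 ++ [(st.2, n - 1)] else st.1

-- loop invariant: before processing index a, either a wall just ended at a-1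
-- (regionSize = 0, B's start = a) or a run is open (curr_start = start,
-- regionSize = a - curr_start), and the accumulated regions coincide.
lemma seg_inv (proj : List Int) (n : Int) (k : Nat) :
    ∀ (a : Int), (n - a).toNat = k → a ≤ n →
    ∀ (rA rB : List (Int × Int)) (sz c s : Int),
    ((sz = 0 ∧ s = a ∧ rA = rB) ∨ (1 ≤ sz ∧ c = s ∧ sz = a - c ∧ rA = rB)) →
    finA n ((PySem.List.pyRange a n 1).foldl (stepA proj) (rA, sz, c))
      = finB n (((PySem.List.pyRange a n 1).filter (wallP proj)).foldl stepB (rB, s)) := by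
  induction k with
  | zero =>
    intro a hk ha rA rB sz c s hinv
    have han : a = n := by omega
    subst han
    rw [PySem.List.pyRange_one_eq_nil (le_refl a)]
    simp only [List.filter_nil, List.foldl_nil, finA, finB]
    rcases hinv with ⟨h0, hs, hr⟩ | ⟨h1, hc, hsz, hr⟩
    · subst hr; rw [if_neg (by omega), if_neg (by omega)]
    · subst hr
      rw [hsz, hc]
  | succ k ih =>
    intro a hk ha rA rB sz c s hinv
    have hlt : a < n := by omega
    rw [PySem.List.pyRange_one_cons hlt]
    by_cases hw : PySem.List.pyGetD proj a 0 = 1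
    · -- wall at a
      have hfil : wallP proj a = true := by simp [wallP, hw]
      rw [List.filter_cons_of_pos hfil, List.foldl_cons, List.foldl_cons]
      have hstA : stepA proj (rA, sz, c) a
          = ((if sz ≥ 2 then rA ++ [(c, a - 1)] else rA), 0, c) := by
        simp [stepA, hw]
      have hstB : stepB (rB, s) a
          = ((if a - s ≥ 2 then rB ++ [(s, a - 1)] else rB), a + 1) := by
        simp [stepB]
      rw [hstA, hstB]
      apply ih (a + 1) (by omega) (by omega)
      left
      refine ⟨rfl, rfl, ?_⟩
      rcases hinv with ⟨h0, hs, hr⟩ | ⟨h1, hc, hsz, hr⟩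
      · subst hr hs; rw [if_neg (by omega), if_neg (by omega)]
      · subst hr
        rw [hsz, hc]
    · -- no wall at a
      have hfil : ¬ wallP proj a = true := by simp [wallP, hw]
      rw [List.filter_cons_of_neg hfil, List.foldl_cons]
      rcases hinv with ⟨h0, hs, hr⟩ | ⟨h1, hc, hsz, hr⟩
      · have hstA : stepA proj (rA, sz, c) a = (rA, 1, a) := by
          simp [stepA, hw, h0]
        rw [hstA]
        apply ih (a + 1) (by omega) (by omega)
        right
        exact ⟨le_refl 1, hs.symm ▸ rfl, by omega, hr⟩
      · have hstA : stepA proj (rA, sz, c) a = (rA, sz + 1, c) := by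
          have hsz0 : ¬ sz = 0 := by omega
          simp [stepA, hw, hsz0]
        rw [hstA]
        apply ih (a + 1) (by omega) (by omega)
        right
        exact ⟨by omega, hc, by omega, hr⟩

-- ===== VERDICT (by name: the statement is the Claim_ definition above) =====
theorem segmentSingleAxis_spec : Claim_equal_segmentSingleAxis := by
  intro projection _
  unfold Spec_segmentSingleAxis segmentSingleAxis segmentSingleAxis_alt
  cases projection with
  | nil => rfl
  | cons x xs =>
    have h1 : (1 : Int) ≤ ((x :: xs).length : Int) := by
      simp
    exact seg_inv (x :: xs) ((x :: xs).length : Int)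
      (((x :: xs).length : Int) - 1).toNat 1 (by omega) h1 [] [] 1 0 0
      (Or.inr ⟨le_refl 1, rfl, by omega, rfl⟩)
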